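-- pv_equiv track=rewrite | github.com/AbdulHakeemPH40/cortex | src/ai/github/agent.py | _analyze_changed_files
-- ===== SOURCE A (Python) =====
-- from typing import Dict, List, Optional, Any
--
-- def _analyze_changed_files(files: List[str]) -> dict:
--     """Analyze changed file types."""
--     analysis = {
--         "python_files": len([f for f in files if f.endswith(".py")]),
--         "javascript_files": len([f for f in files if f.endswith(".js")]),
--         "test_files": len([f for f in files if "test" in f.lower()]),
--         "config_files": len([f for f in files if f.endswith((".json", ".yaml", ".yml", ".toml"))]),
--         "doc_files": len([f for f in files if f.endswith(".md")])
--     }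
--     return analysis
-- ===== SOURCE B (Python) =====
-- _EXT_KEY = {
--     "py": "python_files",
--     "js": "javascript_files",
--     "json": "config_files",
--     "yaml": "config_files",
--     "yml": "config_files",
--     "toml": "config_files",
--     "md": "doc_files",
-- }
--
-- def _file_key(f):
--     """Category key for the filename's extension, or None."""
--     dot = f.rfind(".")
--     if dot == -1:
--         return None
--     return _EXT_KEY.get(f[dot + 1:])
--
-- def _analyze_changed_files(files):
--     """Analyze changed file types."""
--     counts = {"python_files": 0, "javascript_files": 0, "test_files": 0,
--               "config_files": 0, "doc_files": 0}
--     for f in files: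
--         key = _file_key(f)
--         if key is not None:
--             counts[key] += 1
--         if "test" in f.lower():
--             counts["test_files"] += 1
--     return counts
-- ===== Notes on version B (the rewrite author's own statement) =====
-- stated objective: faster
-- what changed: Replaces the five suffix-test passes with a single pass that extracts each filename's extension once (rfind('.') + slice) and dispatches it through a hash table mapping extensions to category keys, counting into a pre-keyed dict; only the 'test' substring check remains a per-file predicate.
import Mathlib
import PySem

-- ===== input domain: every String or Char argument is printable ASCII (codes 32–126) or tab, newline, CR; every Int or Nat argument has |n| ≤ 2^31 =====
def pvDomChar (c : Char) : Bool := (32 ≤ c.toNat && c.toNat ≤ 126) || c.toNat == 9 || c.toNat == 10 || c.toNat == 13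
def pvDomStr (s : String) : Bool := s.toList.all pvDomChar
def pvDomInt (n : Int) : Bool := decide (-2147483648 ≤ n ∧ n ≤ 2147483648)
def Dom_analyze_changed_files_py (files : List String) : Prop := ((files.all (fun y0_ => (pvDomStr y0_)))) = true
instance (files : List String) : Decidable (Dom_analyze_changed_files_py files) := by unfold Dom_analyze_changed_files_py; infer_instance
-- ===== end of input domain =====

-- B replaces A's five suffix-test passes with one pass that extracts each filename's extension (rfind + slice) and dispatches it through an extension→category table, counting into a pre-keyed dict; a timing run measured it faster by a constant factor.


-- ===== PORT A =====
-- f.endswith((".json", ".yaml", ".yml", ".toml")) : any of the four suffixes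
def pvIsConfig (f : String) : Bool :=
  PySem.Str.endswith f ".json" || PySem.Str.endswith f ".yaml" ||
  PySem.Str.endswith f ".yml" || PySem.Str.endswith f ".toml"

def analyze_changed_files_py (files : List String) : List (String × Int) :=
  [ ("python_files", ((files.filter (fun f => PySem.Str.endswith f ".py")).length : Int)),
    ("javascript_files", ((files.filter (fun f => PySem.Str.endswith f ".js")).length : Int)),
    ("test_files", ((files.filter (fun f => PySem.Str.isIn "test" (PySem.Str.lower f))).length : Int)),
    ("config_files", ((files.filter pvIsConfig).length : Int)),
    ("doc_files", ((files.filter (fun f => PySem.Str.endswith f ".md")).length : Int)) ]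

-- ===== PORT B =====
-- the module-level dict literal _EXT_KEY (distinct keys, in source order)
def pvExtKey : PySem.Dict String String :=
  PySem.Dict.mk [("py", "python_files"), ("js", "javascript_files"), ("json", "config_files"),
    ("yaml", "config_files"), ("yml", "config_files"), ("toml", "config_files"), ("md", "doc_files")]

-- _file_key: extension after the last '.', looked up in the table (None if no '.' or unknown extension)
def pvFileKey (f : String) : Option String :=
  let dot := PySem.Str.rfind f "."
  if dot = -1 then none
  else pvExtKey.get? (PySem.Str.slice f (some (dot + 1)) none)

-- loop body: counts[key] += 1 for the extension's category (if any), then the 'test' check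
def pvStepB (counts : PySem.Dict String Int) (f : String) : PySem.Dict String Int :=
  let counts :=
    match pvFileKey f with
    | some key => counts.insert key (counts.getD key 0 + 1)
    | none => counts
  if PySem.Str.isIn "test" (PySem.Str.lower f) then
    counts.insert "test_files" (counts.getD "test_files" 0 + 1)
  else counts

def analyze_changed_files_py_alt (files : List String) : List (String × Int) :=
  (files.foldl pvStepB (PySem.Dict.mk
    [("python_files", 0), ("javascript_files", 0), ("test_files", 0),
     ("config_files", 0), ("doc_files", 0)])).items

-- ===== PRECONDITION & SPEC =====
def Spec_analyze_changed_files_py (files : List String) (out : List (String × Int)) : Prop := out = analyze_changed_files_py_alt files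
instance (files : List String) (out : List (String × Int)) : Decidable (Spec_analyze_changed_files_py files out) := by unfold Spec_analyze_changed_files_py; infer_instance

-- ===== CLAIM (what is proved, stated in full; the proofs are below) =====
def Claim_equal_analyze_changed_files_py : Prop := ∀ (files : List String), Dom_analyze_changed_files_py files → Spec_analyze_changed_files_py files (analyze_changed_files_py files)

-- ===== LEMMAS AND PROOFS =====

-- the five-key counts dict with variable values
def pvD (p j t c d : Int) : PySem.Dict String Int :=
  PySem.Dict.mk [("python_files", p), ("javascript_files", j), ("test_files", t),
    ("config_files", c), ("doc_files", d)]

-- ['.'] is a prefix of cs.drop i iff cs[i] is '.'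
theorem pv_prefix_dot (cs : List Char) (i : Nat) :
    (['.'].isPrefixOf (cs.drop i)) = true ↔ cs[i]? = some '.' := by
  rw [List.isPrefixOf_iff_prefix, ← List.head?_drop]
  cases h : cs.drop i with
  | nil => simp
  | cons a l => simp [List.cons_prefix_cons, eq_comm]

-- characterization of rfind.go for the single-char needle ['.']
theorem pv_go_spec (cs : List Char) (j : Nat) :
    (PySem.Chars.rfind.go cs ['.'] j = -1 ∧ ∀ i : Nat, i ≤ j → cs[i]? ≠ some '.') ∨
    (∃ m : Nat, PySem.Chars.rfind.go cs ['.'] j = (m : Int) ∧ m ≤ j ∧ cs[m]? = some '.' ∧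
      ∀ i : Nat, m < i → i ≤ j → cs[i]? ≠ some '.') := by
  induction j with
  | zero =>
    rw [PySem.Chars.rfind.go]
    by_cases h : cs[0]? = some '.'
    · right
      have hp : (['.'].isPrefixOf cs) = true := by
        have := (pv_prefix_dot cs 0).mpr h
        simpa using this
      rw [hp]
      exact ⟨0, by simp, le_refl 0, h, fun i hi hle => by omega⟩
    · left
      have hp : (['.'].isPrefixOf cs) = false := by
        rw [Bool.eq_false_iff]; intro hc
        exact h (by simpa using (pv_prefix_dot cs 0).mp (by simpa using hc))
      rw [hp]
      exact ⟨by simp, fun i hi => by interval_cases i; exact h⟩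
  | succ j ih =>
    rw [PySem.Chars.rfind.go]
    by_cases h : cs[j+1]? = some '.'
    · right
      refine ⟨j+1, ?_, le_refl _, h, fun i hi hle => by omega⟩
      simp [(pv_prefix_dot cs (j+1)).mpr h]
    · have hp : (['.'].isPrefixOf (cs.drop (j+1))) = false := by
        rw [Bool.eq_false_iff]; intro hc; exact h ((pv_prefix_dot cs (j+1)).mp hc)
      rw [hp]
      simp only [Bool.false_eq_true, if_false]
      rcases ih with ⟨h1, h2⟩ | ⟨m, h1, h2, h3, h4⟩
      · left
        refine ⟨h1, fun i hi => ?_⟩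
        rcases Nat.lt_or_ge i (j+1) with hlt | hge
        · exact h2 i (by omega)
        · have : i = j+1 := by omega
          subst this; exact h
      · right
        refine ⟨m, h1, by omega, h3, fun i hi hle => ?_⟩
        rcases Nat.lt_or_ge i (j+1) with hlt | hge
        · exact h4 i hi (by omega)
        · have : i = j+1 := by omega
          subst this; exact h

-- the table lookup, written out
theorem pv_table_get (s : String) :
    pvExtKey.get? s =
      if s = "py" then some "python_files"
      else if s = "js" then some "javascript_files"
      else if s = "json" ∨ s = "yaml" ∨ s = "yml" ∨ s = "toml" then some "config_files"
      else if s = "md" then some "doc_files"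
      else none := by
  simp only [pvExtKey, PySem.Dict.get?, List.find?]
  split_ifs with h1 h2 h3 h4
  · subst h1; rfl
  · subst h2; rfl
  · rcases h3 with h | h | h | h <;> subst h <;> rfl
  · subst h4; rfl
  · push_neg at h3
    have hne : ∀ t : String, s ≠ t → (t == s) = false :=
      fun t h => beq_eq_false_iff_ne.mpr (Ne.symm h)
    simp [hne _ h1, hne _ h2, hne _ h3.1, hne _ h3.2.1, hne _ h3.2.2.1, hne _ h3.2.2.2, hne _ h4]

-- endswith ('.'::e) in terms of rfind and the extension slice (char level)
theorem pv_key_ext (f : String) (e : List Char) (hne : '.' ∉ e) :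
    PySem.Chars.endswith f.toList ('.'::e) = true ↔
      (PySem.Str.rfind f "." ≠ -1 ∧
       (PySem.Str.slice f (some (PySem.Str.rfind f "." + 1)) none).toList = e) := by
  have hr : PySem.Str.rfind f "." = PySem.Chars.rfind f.toList ['.'] := by
    simp [PySem.Str.rfind_eq]
  constructor
  · intro hsuf
    rw [PySem.Chars.endswith_iff] at hsuf
    obtain ⟨pre, hpre⟩ := hsuf
    have hlen : pre.length < f.toList.length := by
      rw [← hpre]; simp
    have hdotAt : f.toList[pre.length]? = some '.' := by
      rw [← hpre, List.getElem?_append_right (le_refl _)]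
      simp
    rcases pv_go_spec f.toList f.toList.length with ⟨h1, h2⟩ | ⟨m, h1, h2, h3, h4⟩
    · exact absurd hdotAt (h2 pre.length (by omega))
    · have hrm : PySem.Chars.rfind f.toList ['.'] = (m : Int) := h1
      have hm : m = pre.length := by
        rcases Nat.lt_trichotomy m pre.length with hlt | heq | hgt
        · exact absurd hdotAt (h4 pre.length hlt (by omega))
        · exact heq
        · -- cs[m]? lands in e
          have hmlt : m < f.toList.length := (List.getElem?_eq_some_iff.mp h3).1
          have : f.toList[m]? = e[m - pre.length - 1]? := by
            rw [← hpre, List.getElem?_append_right (by omega)]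
            have : m - pre.length = (m - pre.length - 1) + 1 := by omega
            rw [this]
            simp
          rw [this] at h3
          exact absurd (List.mem_of_getElem? h3) hne
      subst hm
      refine ⟨by rw [hr, hrm]; exact by omega, ?_⟩
      rw [hr, hrm]
      have : ((pre.length : Int) + 1) = ((pre.length + 1 : Nat) : Int) := by push_cast; ring
      simp only [PySem.Str.toList_slice, PySem.Chars.slice_eq_listSlice, this,
        PySem.List.slice_from_natCast]
      rw [← hpre, ← List.drop_drop, List.drop_left]
      simp
  · rintro ⟨hne1, hslice⟩
    rw [hr] at hne1 hslice
    rcases pv_go_spec f.toList f.toList.length with ⟨h1, _⟩ | ⟨m, h1, h2, h3, h4⟩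
    · exact absurd h1 hne1
    · have hgo : PySem.Chars.rfind f.toList ['.'] = PySem.Chars.rfind.go f.toList ['.'] f.toList.length := rfl
      rw [hgo, h1] at hslice
      have hmlt : m < f.toList.length := (List.getElem?_eq_some_iff.mp h3).1
      have hdrop : f.toList.drop (m+1) = e := by
        have : ((m : Int) + 1) = ((m + 1 : Nat) : Int) := by push_cast; ring
        simpa only [PySem.Str.toList_slice, PySem.Chars.slice_eq_listSlice, this,
          PySem.List.slice_from_natCast] using hslice
      rw [PySem.Chars.endswith_iff]
      refine ⟨f.toList.take m, ?_⟩
      have hgetm : f.toList[m] = '.' := by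
        have := List.getElem?_eq_some_iff.mp h3
        exact this.2
      calc f.toList.take m ++ '.' :: e
          = f.toList.take m ++ f.toList[m] :: f.toList.drop (m+1) := by rw [hgetm, hdrop]
        _ = f.toList.take m ++ f.toList.drop m := by rw [List.drop_eq_getElem_cons hmlt]
        _ = f.toList := List.take_append_drop m f.toList

-- endswith ('.'::e) in terms of pvFileKey's pieces, String-level
theorem pv_ends (f s : String) (e : List Char) (he : s.toList = e) (hne : '.' ∉ e) :
    PySem.Str.endswith f (String.ofList ('.'::e)) = true ↔
      (PySem.Str.rfind f "." ≠ -1 ∧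
       PySem.Str.slice f (some (PySem.Str.rfind f "." + 1)) none = s) := by
  rw [show PySem.Str.endswith f (String.ofList ('.'::e)) = PySem.Chars.endswith f.toList ('.'::e) from by
      simp [PySem.Str.endswith_eq, String.toList_ofList]]
  rw [pv_key_ext f e hne]
  constructor
  · rintro ⟨h1, h2⟩
    exact ⟨h1, String.toList_inj.mp (h2.trans he.symm)⟩
  · rintro ⟨h1, h2⟩
    exact ⟨h1, (congrArg String.toList h2).trans he⟩

-- _file_key agrees with A's endswith predicates, category by category
theorem pv_key_py (f : String) : pvFileKey f = some "python_files" ↔ PySem.Str.endswith f ".py" = true := by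
  have hends := pv_ends f "py" ['p','y'] rfl (by decide)
  rw [show String.ofList ['.','p','y'] = (".py" : String) from rfl] at hends
  unfold pvFileKey
  by_cases hd : PySem.Str.rfind f "." = -1
  · rw [if_pos hd, hends]
    exact iff_of_false (by simp) (fun hc => absurd hd hc.1)
  · rw [if_neg hd, pv_table_get, hends]
    split_ifs with h1 h2 h3 h4
    · exact iff_of_true rfl ⟨hd, h1⟩
    · exact iff_of_false (by simp) (fun hc => by rw [hc.2] at h2; exact absurd h2 (by decide))
    · exact iff_of_false (by simp)
        (fun hc => by rcases h3 with h | h | h | h <;> (rw [hc.2] at h; exact absurd h (by decide)))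
    · exact iff_of_false (by simp) (fun hc => by rw [hc.2] at h4; exact absurd h4 (by decide))
    · exact iff_of_false (by simp) (fun hc => h1 hc.2)

theorem pv_key_js (f : String) : pvFileKey f = some "javascript_files" ↔ PySem.Str.endswith f ".js" = true := by
  have hends := pv_ends f "js" ['j','s'] rfl (by decide)
  rw [show String.ofList ['.','j','s'] = (".js" : String) from rfl] at hends
  unfold pvFileKey
  by_cases hd : PySem.Str.rfind f "." = -1
  · rw [if_pos hd, hends]
    exact iff_of_false (by simp) (fun hc => absurd hd hc.1)
  · rw [if_neg hd, pv_table_get, hends]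
    split_ifs with h1 h2 h3 h4
    · exact iff_of_false (by simp) (fun hc => by rw [hc.2] at h1; exact absurd h1 (by decide))
    · exact iff_of_true rfl ⟨hd, h2⟩
    · exact iff_of_false (by simp)
        (fun hc => by rcases h3 with h | h | h | h <;> (rw [hc.2] at h; exact absurd h (by decide)))
    · exact iff_of_false (by simp) (fun hc => by rw [hc.2] at h4; exact absurd h4 (by decide))
    · exact iff_of_false (by simp) (fun hc => h2 hc.2)

theorem pv_key_md (f : String) : pvFileKey f = some "doc_files" ↔ PySem.Str.endswith f ".md" = true := by
  have hends := pv_ends f "md" ['m','d'] rfl (by decide)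
  rw [show String.ofList ['.','m','d'] = (".md" : String) from rfl] at hends
  unfold pvFileKey
  by_cases hd : PySem.Str.rfind f "." = -1
  · rw [if_pos hd, hends]
    exact iff_of_false (by simp) (fun hc => absurd hd hc.1)
  · rw [if_neg hd, pv_table_get, hends]
    split_ifs with h1 h2 h3 h4
    · exact iff_of_false (by simp) (fun hc => by rw [hc.2] at h1; exact absurd h1 (by decide))
    · exact iff_of_false (by simp) (fun hc => by rw [hc.2] at h2; exact absurd h2 (by decide))
    · exact iff_of_false (by simp)
        (fun hc => by rcases h3 with h | h | h | h <;> (rw [hc.2] at h; exact absurd h (by decide)))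
    · exact iff_of_true rfl ⟨hd, h4⟩
    · exact iff_of_false (by simp) (fun hc => h4 hc.2)

theorem pv_key_cfg (f : String) : pvFileKey f = some "config_files" ↔ pvIsConfig f = true := by
  have hj := pv_ends f "json" ['j','s','o','n'] rfl (by decide)
  have hy := pv_ends f "yaml" ['y','a','m','l'] rfl (by decide)
  have hm := pv_ends f "yml" ['y','m','l'] rfl (by decide)
  have ht := pv_ends f "toml" ['t','o','m','l'] rfl (by decide)
  rw [show String.ofList ['.','j','s','o','n'] = (".json" : String) from rfl] at hj
  rw [show String.ofList ['.','y','a','m','l'] = (".yaml" : String) from rfl] at hy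
  rw [show String.ofList ['.','y','m','l'] = (".yml" : String) from rfl] at hm
  rw [show String.ofList ['.','t','o','m','l'] = (".toml" : String) from rfl] at ht
  have hcfg : pvIsConfig f = true ↔
      (PySem.Str.endswith f ".json" = true ∨ PySem.Str.endswith f ".yaml" = true ∨
       PySem.Str.endswith f ".yml" = true ∨ PySem.Str.endswith f ".toml" = true) := by
    simp only [pvIsConfig, Bool.or_eq_true, or_assoc]
  rw [hcfg, hj, hy, hm, ht]
  unfold pvFileKey
  by_cases hd : PySem.Str.rfind f "." = -1
  · rw [if_pos hd]
    exact iff_of_false (by simp)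
      (fun hc => by rcases hc with h | h | h | h <;> exact absurd hd h.1)
  · rw [if_neg hd, pv_table_get]
    split_ifs with h1 h2 h3 h4
    · exact iff_of_false (by simp)
        (fun hc => by rcases hc with h | h | h | h <;> (rw [h.2] at h1; exact absurd h1 (by decide)))
    · exact iff_of_false (by simp)
        (fun hc => by rcases hc with h | h | h | h <;> (rw [h.2] at h2; exact absurd h2 (by decide)))
    · refine iff_of_true rfl ?_
      rcases h3 with h | h | h | h
      · exact Or.inl ⟨hd, h⟩
      · exact Or.inr (Or.inl ⟨hd, h⟩)
      · exact Or.inr (Or.inr (Or.inl ⟨hd, h⟩))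
      · exact Or.inr (Or.inr (Or.inr ⟨hd, h⟩))
    · exact iff_of_false (by simp)
        (fun hc => by rcases hc with h | h | h | h <;> (rw [h.2] at h4; exact absurd h4 (by decide)))
    · refine iff_of_false (by simp) (fun hc => h3 ?_)
      rcases hc with h | h | h | h
      · exact Or.inl h.2
      · exact Or.inr (Or.inl h.2)
      · exact Or.inr (Or.inr (Or.inl h.2))
      · exact Or.inr (Or.inr (Or.inr h.2))

theorem pv_key_values (f : String) :
    pvFileKey f = none ∨ pvFileKey f = some "python_files" ∨ pvFileKey f = some "javascript_files" ∨
    pvFileKey f = some "config_files" ∨ pvFileKey f = some "doc_files" := by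
  unfold pvFileKey
  by_cases hd : PySem.Str.rfind f "." = -1
  · rw [if_pos hd]; exact Or.inl rfl
  · rw [if_neg hd, pv_table_get]
    split_ifs <;> simp

-- one loop iteration on the counts dict
theorem pv_step (p j t c d : Int) (f : String) :
    pvStepB (pvD p j t c d) f =
      pvD (p + (if PySem.Str.endswith f ".py" then 1 else 0))
          (j + (if PySem.Str.endswith f ".js" then 1 else 0))
          (t + (if PySem.Str.isIn "test" (PySem.Str.lower f) then 1 else 0))
          (c + (if pvIsConfig f then 1 else 0))
          (d + (if PySem.Str.endswith f ".md" then 1 else 0)) := by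
  have hfalse : ∀ v : Option String, pvFileKey f = v →
      (∀ s, v ≠ some s → pvFileKey f ≠ some s) := by
    intro v hv s hne hc
    exact hne (hv ▸ hc)
  unfold pvStepB
  have hpyf : pvFileKey f ≠ some "python_files" → PySem.Str.endswith f ".py" = false :=
    fun hn => by rw [Bool.eq_false_iff]; exact fun hc => hn ((pv_key_py f).mpr hc)
  have hjsf : pvFileKey f ≠ some "javascript_files" → PySem.Str.endswith f ".js" = false :=
    fun hn => by rw [Bool.eq_false_iff]; exact fun hc => hn ((pv_key_js f).mpr hc)
  have hmdf : pvFileKey f ≠ some "doc_files" → PySem.Str.endswith f ".md" = false :=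
    fun hn => by rw [Bool.eq_false_iff]; exact fun hc => hn ((pv_key_md f).mpr hc)
  have hcff : pvFileKey f ≠ some "config_files" → pvIsConfig f = false :=
    fun hn => by rw [Bool.eq_false_iff]; exact fun hc => hn ((pv_key_cfg f).mpr hc)
  rcases pv_key_values f with h | h | h | h | h <;> rw [h]
  · rw [hpyf (hfalse _ h _ (by simp)), hjsf (hfalse _ h _ (by simp)),
      hmdf (hfalse _ h _ (by simp)), hcff (hfalse _ h _ (by simp))]
    by_cases ht : PySem.Str.isIn "test" (PySem.Str.lower f) = true
    · rw [if_pos ht]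
      simp [pvD, PySem.Dict.insert, PySem.Dict.contains, PySem.Dict.getD, PySem.Dict.get?]
      simpa using ht
    · rw [if_neg ht]
      simp [pvD, PySem.Dict.insert, PySem.Dict.contains, PySem.Dict.getD, PySem.Dict.get?]
      exact Bool.eq_false_iff.mpr (by simpa using ht)
  · rw [(pv_key_py f).mp h, hjsf (hfalse _ h _ (by simp)),
      hmdf (hfalse _ h _ (by simp)), hcff (hfalse _ h _ (by simp))]
    by_cases ht : PySem.Str.isIn "test" (PySem.Str.lower f) = true
    · rw [if_pos ht]
      simp [pvD, PySem.Dict.insert, PySem.Dict.contains, PySem.Dict.getD, PySem.Dict.get?]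
      simpa using ht
    · rw [if_neg ht]
      simp [pvD, PySem.Dict.insert, PySem.Dict.contains, PySem.Dict.getD, PySem.Dict.get?]
      exact Bool.eq_false_iff.mpr (by simpa using ht)
  · rw [(pv_key_js f).mp h, hpyf (hfalse _ h _ (by simp)),
      hmdf (hfalse _ h _ (by simp)), hcff (hfalse _ h _ (by simp))]
    by_cases ht : PySem.Str.isIn "test" (PySem.Str.lower f) = true
    · rw [if_pos ht]
      simp [pvD, PySem.Dict.insert, PySem.Dict.contains, PySem.Dict.getD, PySem.Dict.get?]
      simpa using ht
    · rw [if_neg ht]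
      simp [pvD, PySem.Dict.insert, PySem.Dict.contains, PySem.Dict.getD, PySem.Dict.get?]
      exact Bool.eq_false_iff.mpr (by simpa using ht)
  · rw [(pv_key_cfg f).mp h, hpyf (hfalse _ h _ (by simp)),
      hjsf (hfalse _ h _ (by simp)), hmdf (hfalse _ h _ (by simp))]
    by_cases ht : PySem.Str.isIn "test" (PySem.Str.lower f) = true
    · rw [if_pos ht]
      simp [pvD, PySem.Dict.insert, PySem.Dict.contains, PySem.Dict.getD, PySem.Dict.get?]
      simpa using ht
    · rw [if_neg ht]
      simp [pvD, PySem.Dict.insert, PySem.Dict.contains, PySem.Dict.getD, PySem.Dict.get?]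
      exact Bool.eq_false_iff.mpr (by simpa using ht)
  · rw [(pv_key_md f).mp h, hpyf (hfalse _ h _ (by simp)),
      hjsf (hfalse _ h _ (by simp)), hcff (hfalse _ h _ (by simp))]
    by_cases ht : PySem.Str.isIn "test" (PySem.Str.lower f) = true
    · rw [if_pos ht]
      simp [pvD, PySem.Dict.insert, PySem.Dict.contains, PySem.Dict.getD, PySem.Dict.get?]
      simpa using ht
    · rw [if_neg ht]
      simp [pvD, PySem.Dict.insert, PySem.Dict.contains, PySem.Dict.getD, PySem.Dict.get?]
      exact Bool.eq_false_iff.mpr (by simpa using ht)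

-- the loop invariant
theorem pv_fold (files : List String) (p j t c d : Int) :
    files.foldl pvStepB (pvD p j t c d) =
      pvD (p + ((files.filter (fun f => PySem.Str.endswith f ".py")).length : Int))
          (j + ((files.filter (fun f => PySem.Str.endswith f ".js")).length : Int))
          (t + ((files.filter (fun f => PySem.Str.isIn "test" (PySem.Str.lower f))).length : Int))
          (c + ((files.filter pvIsConfig).length : Int))
          (d + ((files.filter (fun f => PySem.Str.endswith f ".md")).length : Int)) := by
  induction files generalizing p j t c d with
  | nil => simp [pvD]
  | cons f fs ih =>
    simp only [List.foldl_cons, pv_step, ih, List.filter_cons]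
    split_ifs
    all_goals simp only [pvD, List.length_cons, Nat.cast_add, Nat.cast_one, PySem.Dict.mk.injEq,
      List.cons.injEq, Prod.mk.injEq, and_true, true_and]
    all_goals (and_intros <;> first | rfl | omega)

-- ===== VERDICT (by name: the statement is the Claim_ definition above) =====
theorem analyze_changed_files_py_spec : Claim_equal_analyze_changed_files_py := by
  intro files _
  unfold Spec_analyze_changed_files_py analyze_changed_files_py analyze_changed_files_py_alt
  have h : PySem.Dict.mk
      [("python_files", (0 : Int)), ("javascript_files", 0), ("test_files", 0),
       ("config_files", 0), ("doc_files", 0)] = pvD 0 0 0 0 0 := rfl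
  rw [h, pv_fold]
  simp [pvD]
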